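-- pv_equiv track=rewrite | github.com/PrinceSinghhub/GFG-Questions | Number of positive integral solutions.py | posIntSol
-- ===== SOURCE A (Python) =====
-- def posIntSol(s):
--     def calnCr(n, r):
--         f = [1 for i in range(n + 1)]
--         for i in range(1, n + 1):
--             f[i] = f[i - 1] * i
--         return f[n] // (f[r] * f[n - r]);
--
--     cnt = 0
--     idx = 0
--     for i in range(len(s)):
--         cnt += (s[i] == '+')
--         if s[i] == '=':
--             idx = i
--     n = cnt + 1
--     k = int(s[idx + 1:])
--     if (n > k):
--         return 0
--     n = n - 1
--     k = k - 1
--     return calnCr(k, n)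
-- ===== SOURCE B (Python) =====
-- def posIntSol(s):
--     n = 1
--     idx = 0
--     for i, ch in enumerate(s):
--         if ch == '+':
--             n += 1
--         elif ch == '=':
--             idx = i
--     k = int(s[idx + 1:])
--     if n > k:
--         return 0
--     r = min(n - 1, k - n)
--     res = 1
--     for i in range(r):
--         res = res * (k - 1 - i) // (i + 1)
--     return res
-- ===== Notes on version B (the rewrite author's own statement) =====
-- stated objective: faster
-- what changed: B keeps the parse of n (count of '+') and k (int after the last '=') but replaces A's helper that builds the whole factorial table f[0..k-1] and divides f[k-1] by f[n-1]*f[k-n] with an incremental multiplicative binomial: r = min(n-1, k-n) exact multiply-then-divide steps computing C(k-1, n-1) directly.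
import Mathlib
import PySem

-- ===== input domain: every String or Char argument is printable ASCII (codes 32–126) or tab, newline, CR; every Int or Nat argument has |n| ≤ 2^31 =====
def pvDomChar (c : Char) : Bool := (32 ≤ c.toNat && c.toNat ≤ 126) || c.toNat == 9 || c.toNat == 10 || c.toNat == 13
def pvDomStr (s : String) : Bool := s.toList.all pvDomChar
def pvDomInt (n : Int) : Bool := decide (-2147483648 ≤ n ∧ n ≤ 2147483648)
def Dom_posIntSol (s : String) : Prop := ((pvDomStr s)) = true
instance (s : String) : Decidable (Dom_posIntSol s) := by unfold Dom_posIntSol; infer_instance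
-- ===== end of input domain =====

-- B replaces A's factorial-table nCr (building all factorials up to k-1 and dividing)
-- by the incremental multiplicative binomial C(k-1,n-1) over r = min(n-1, k-n) factors
-- (objective: faster — an asymptotically smaller loop; not timed by the check here).

-- ===== PORT A =====
def posIntSolCal (n r : Int) : Int :=
  let f : List Int := (PySem.List.pyRange 0 (n + 1) 1).map (fun _ => (1 : Int))
  let f := (PySem.List.pyRange 1 (n + 1) 1).foldl
      (fun (g : List Int) (i : Int) => g.set i.toNat (PySem.List.pyGetD g (i - 1) 0 * i)) f
  PySem.Int.floordiv (PySem.List.pyGetD f n 0)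
    (PySem.List.pyGetD f r 0 * PySem.List.pyGetD f (n - r) 0)

def posIntSol (s : String) : Int :=
  let cs := s.toList
  let st := (PySem.List.pyRange 0 (cs.length : Int) 1).foldl
      (fun (st : Int × Int) (i : Int) =>
        (st.1 + (if PySem.List.pyGet? cs i = some '+' then 1 else 0),
         if PySem.List.pyGet? cs i = some '=' then i else st.2)) ((0 : Int), (0 : Int))
  let n := st.1 + 1
  match PySem.Int.ofChars? (PySem.List.slice cs (some (st.2 + 1)) none) with
  | none => 0
  | some k => if n > k then 0 else posIntSolCal (k - 1) (n - 1)

-- ===== PORT B =====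
def posIntSol_alt (s : String) : Int :=
  let st := (PySem.List.enumerate s.toList 0).foldl
      (fun (st : Int × Int) (p : Int × Char) =>
        if p.2 = '+' then (st.1 + 1, st.2)
        else if p.2 = '=' then (st.1, p.1)
        else st) ((1 : Int), (0 : Int))
  match PySem.Int.ofChars? (PySem.List.slice s.toList (some (st.2 + 1)) none) with
  | none => 0
  | some k =>
    if st.1 > k then 0
    else
      (PySem.List.pyRange 0 (min (st.1 - 1) (k - st.1)) 1).foldl
        (fun res i => PySem.Int.floordiv (res * (k - 1 - i)) (i + 1)) 1

-- ===== PRECONDITION & SPEC =====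
-- Pre_ excludes exactly the inputs on which A raises ValueError: the text after the last '='
-- (after index 0 when no '=' occurs) does not parse as a Python int.
def pvTail (cs : List Char) : List Char :=
  if '=' ∈ cs then (cs.reverse.takeWhile (fun c => c ≠ '=')).reverse else cs.drop 1

def Pre_posIntSol (s : String) : Prop :=
  (PySem.Int.ofChars? (pvTail s.toList)).isSome = true
instance (s : String) : Decidable (Pre_posIntSol s) := by unfold Pre_posIntSol; infer_instance

def pvWitness_posIntSol : String := "1+2=5"

def Spec_posIntSol (s : String) (out : Int) : Prop := out = posIntSol_alt s
instance (s : String) (out : Int) : Decidable (Spec_posIntSol s out) := by unfold Spec_posIntSol; infer_instance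

-- ===== CLAIM (what is proved, stated in full; the proofs are below) =====
def Claim_equal_posIntSol : Prop := ∀ (s : String), Dom_posIntSol s → Pre_posIntSol s → Spec_posIntSol s (posIntSol s)

-- ===== LEMMAS AND PROOFS =====

-- named copies of the two parse-loop bodies (definitionally equal to the lambdas in the ports)
def pvStepA (cs : List Char) : (Int × Int) → Int → (Int × Int) := fun st i =>
  (st.1 + (if PySem.List.pyGet? cs i = some '+' then 1 else 0),
   if PySem.List.pyGet? cs i = some '=' then i else st.2)

def pvStepB : (Int × Int) → (Int × Char) → (Int × Int) := fun st p =>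
  if p.2 = '+' then (st.1 + 1, st.2)
  else if p.2 = '=' then (st.1, p.1)
  else st

theorem pv_enum_append {α : Type} (xs : List α) (c : α) : ∀ s : Int,
    PySem.List.enumerate (xs ++ [c]) s = PySem.List.enumerate xs s ++ [(s + xs.length, c)] := by
  induction xs with
  | nil => intro s; simp [PySem.List.enumerate]
  | cons x t ih =>
      intro s
      simp only [List.cons_append, PySem.List.enumerate, ih (s + 1), List.length_cons]
      have h : s + 1 + (t.length : Int) = s + ((t.length + 1 : Nat) : Int) := by push_cast; ring
      rw [h]

theorem pv_pyRange_zero_nat (m : Nat) :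
    PySem.List.pyRange 0 (m : Int) 1 = (List.range m).map (fun i : Nat => (i : Int)) := by
  rw [PySem.List.pyRange_of_pos 0 (m : Int) Int.one_pos]
  rcases Nat.eq_zero_or_pos m with h | h
  · subst h; simp
  · rw [if_pos (by exact_mod_cast h)]
    have h2 : (((m : Int) - 0 + 1 - 1) / 1).toNat = m := by omega
    rw [h2]
    apply List.map_congr_left
    intro i _
    ring

theorem pv_pyRange_nil {a b : Int} (h : b ≤ a) : PySem.List.pyRange a b 1 = [] := by
  rw [PySem.List.pyRange_of_pos a b Int.one_pos, if_neg (by omega)]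
  simp

theorem pv_parse_rel (cs : List Char) :
    (PySem.List.pyRange 0 (cs.length : Int) 1).foldl (pvStepA cs) (0, 0)
      = (((PySem.List.enumerate cs 0).foldl pvStepB (1, 0)).1 - 1,
         ((PySem.List.enumerate cs 0).foldl pvStepB (1, 0)).2) := by
  induction cs using List.reverseRecOn with
  | nil => decide
  | append_singleton cs c ih =>
      have hlen : (((cs ++ [c]).length : Nat) : Int) = (cs.length : Int) + 1 := by
        simp
      have hsingle : PySem.List.pyRange (cs.length : Int) ((cs.length : Int) + 1) 1
          = [(cs.length : Int)] := by
        rw [PySem.List.pyRange_one_cons (by omega), pv_pyRange_nil (by omega)]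
      have hsplit : PySem.List.pyRange 0 (((cs ++ [c]).length : Nat) : Int) 1
          = PySem.List.pyRange 0 (cs.length : Int) 1 ++ [(cs.length : Int)] := by
        rw [hlen, PySem.List.pyRange_one_append 0 (cs.length : Int) ((cs.length : Int) + 1)
          (by omega) (by omega), hsingle]
      have hcongr : ∀ (acc : Int × Int), ∀ x ∈ PySem.List.pyRange 0 (cs.length : Int) 1,
          pvStepA (cs ++ [c]) acc x = pvStepA cs acc x := by
        intro acc x hx
        rw [PySem.List.mem_pyRange_iff_of_pos Int.one_pos] at hx
        obtain ⟨v, rfl⟩ : ∃ v : Nat, x = ((v : Nat) : Int) := ⟨x.toNat, by omega⟩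
        have hlt : v < cs.length := by
          have := hx.2.1
          exact_mod_cast this
        simp only [pvStepA, PySem.List.pyGet?_natCast,
          List.getElem?_append_left hlt]
      rw [hsplit, List.foldl_append, PySem.List.foldl_congr_mem _ _ _ _ hcongr, ih,
        pv_enum_append cs c 0, List.foldl_append]
      set b := (PySem.List.enumerate cs 0).foldl pvStepB (1, 0) with hb
      simp only [List.foldl_cons, List.foldl_nil]
      by_cases h1 : c = '+'
      · simp [pvStepA, pvStepB, h1]
      · by_cases h2 : c = '='
        · simp [pvStepA, pvStepB, h2]
        · simp [pvStepA, pvStepB, h1, h2]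

theorem pv_foldB_ge (l : List (Int × Char)) : ∀ st : Int × Int, 1 ≤ st.1 →
    1 ≤ (l.foldl pvStepB st).1 := by
  induction l with
  | nil => intro st h; simpa using h
  | cons p t ih =>
      intro st h
      simp only [List.foldl_cons]
      apply ih
      simp only [pvStepB]
      split_ifs <;> (try simp) <;> omega

-- A's factorial table equals the factorial function (below j, ones above)
theorem pv_table (m : Nat) : ∀ j : Nat, j ≤ m →
    (PySem.List.pyRange 1 ((j : Int) + 1) 1).foldl
        (fun (g : List Int) (i : Int) => g.set i.toNat (PySem.List.pyGetD g (i - 1) 0 * i))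
        ((List.range (m + 1)).map (fun _ => (1 : Int)))
      = (List.range (m + 1)).map (fun i => if i ≤ j then (i.factorial : Int) else 1) := by
  intro j
  induction j with
  | zero =>
      intro _
      have h0 : PySem.List.pyRange 1 (((0 : Nat) : Int) + 1) 1 = [] := by
        apply pv_pyRange_nil; omega
      rw [h0, List.foldl_nil]
      apply List.map_congr_left
      intro i _
      split
      · next h => interval_cases i; simp [Nat.factorial]
      · rfl
  | succ j ihj =>
      intro hj
      have hsingle : PySem.List.pyRange ((j : Int) + 1) ((j : Int) + 2) 1 = [(j : Int) + 1] := by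
        rw [PySem.List.pyRange_one_cons (by omega), pv_pyRange_nil (by omega)]
      have hsplit : PySem.List.pyRange 1 (((j + 1 : Nat) : Int) + 1) 1
          = PySem.List.pyRange 1 ((j : Int) + 1) 1 ++ [(j : Int) + 1] := by
        have : (((j + 1 : Nat) : Int) + 1) = (j : Int) + 2 := by push_cast; ring
        rw [this, PySem.List.pyRange_one_append 1 ((j : Int) + 1) ((j : Int) + 2)
          (by omega) (by omega), hsingle]
      rw [hsplit, List.foldl_append, ihj (by omega), List.foldl_cons, List.foldl_nil]
      have hidx : ((j : Int) + 1).toNat = j + 1 := by omega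
      have hsub : (j : Int) + 1 - 1 = ((j : Nat) : Int) := by ring
      have hjlt : j < m + 1 := by omega
      have hget : PySem.List.pyGetD
          ((List.range (m + 1)).map (fun i => if i ≤ j then (i.factorial : Int) else 1))
          ((j : Int) + 1 - 1) 0 = (j.factorial : Int) := by
        rw [hsub, PySem.List.pyGetD_natCast]
        simp [List.getD, hjlt]
      rw [hget, hidx]
      apply List.ext_getElem
      · simp
      · intro i h1 h2
        simp only [List.getElem_set, List.getElem_map, List.getElem_range]
        have hfac : (j.factorial : Int) * ((j : Int) + 1) = ((j + 1).factorial : Int) := by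
          push_cast [Nat.factorial_succ]; ring
        by_cases hij : j + 1 = i
        · subst hij
          simp [hfac]
        · rw [if_neg hij]
          by_cases hle : i ≤ j
          · rw [if_pos hle, if_pos (by omega)]
          · rw [if_neg hle, if_neg (by omega)]

theorem pv_cal_eq_choose (N R : Nat) (hR : R ≤ N) :
    posIntSolCal (N : Int) (R : Int) = (N.choose R : Int) := by
  unfold posIntSolCal
  have h1 : (N : Int) + 1 = ((N + 1 : Nat) : Int) := by push_cast; ring
  have hones : (PySem.List.pyRange 0 ((N : Int) + 1) 1).map (fun _ => (1 : Int))
      = (List.range (N + 1)).map (fun _ => (1 : Int)) := by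
    rw [h1, pv_pyRange_zero_nat, List.map_map]
    apply List.map_congr_left
    intro a _
    rfl
  simp only [hones]
  rw [pv_table N N le_rfl]
  have htab : (List.range (N + 1)).map (fun i => if i ≤ N then (i.factorial : Int) else 1)
      = (List.range (N + 1)).map (fun i => (i.factorial : Int)) := by
    apply List.map_congr_left
    intro i hi
    rw [List.mem_range] at hi
    rw [if_pos (by omega)]
  rw [htab]
  have hget : ∀ (v : Nat), v < N + 1 →
      PySem.List.pyGetD ((List.range (N + 1)).map (fun i => (i.factorial : Int))) ((v : Nat) : Int) 0
        = (v.factorial : Int) := by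
    intro v hv
    rw [PySem.List.pyGetD_natCast]
    simp [List.getD, hv]
  have hNR : (N : Int) - (R : Int) = ((N - R : Nat) : Int) := by omega
  rw [hNR, hget N (by omega), hget R (by omega), hget (N - R) (by omega)]
  have hfact : (N.factorial : Int)
      = (N.choose R : Int) * ((R.factorial : Int) * ((N - R).factorial : Int)) := by
    have := Nat.choose_mul_factorial_mul_factorial hR
    push_cast [← this]; ring
  rw [hfact]
  show PySem.Int.floordiv _ _ = _
  unfold PySem.Int.floordiv
  apply Int.mul_fdiv_cancel
  have h1 : 0 < R.factorial := Nat.factorial_pos R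
  have h2 : 0 < (N - R).factorial := Nat.factorial_pos (N - R)
  positivity

theorem pv_bloop (m : Nat) : ∀ j : Nat, j ≤ m →
    (PySem.List.pyRange 0 ((j : Nat) : Int) 1).foldl
        (fun res i => PySem.Int.floordiv (res * ((m : Int) - i)) (i + 1)) 1
      = (m.choose j : Int) := by
  intro j
  induction j with
  | zero => intro _; simp [PySem.List.pyRange]
  | succ j ihj =>
      intro hj
      have hsingle : PySem.List.pyRange ((j : Nat) : Int) (((j : Nat) : Int) + 1) 1
          = [((j : Nat) : Int)] := by
        rw [PySem.List.pyRange_one_cons (by omega), pv_pyRange_nil (by omega)]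
      have hsplit : PySem.List.pyRange 0 (((j + 1 : Nat) : Nat) : Int) 1
          = PySem.List.pyRange 0 ((j : Nat) : Int) 1 ++ [((j : Nat) : Int)] := by
        have : (((j + 1 : Nat) : Nat) : Int) = ((j : Nat) : Int) + 1 := by push_cast; ring
        rw [this, PySem.List.pyRange_one_append 0 ((j : Nat) : Int) (((j : Nat) : Int) + 1)
          (by omega) (by omega), hsingle]
      rw [hsplit, List.foldl_append, ihj (by omega), List.foldl_cons, List.foldl_nil]
      have hmj : (m : Int) - (j : Int) = ((m - j : Nat) : Int) := by omega
      have hnat : m.choose j * (m - j) = m.choose (j + 1) * (j + 1) :=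
        (Nat.choose_succ_right_eq m j).symm
      have hkey : (m.choose j : Int) * ((m : Int) - (j : Int))
          = (m.choose (j + 1) : Int) * ((j : Int) + 1) := by
        rw [hmj]
        exact_mod_cast hnat
      rw [hkey]
      unfold PySem.Int.floordiv
      apply Int.mul_fdiv_cancel
      omega

-- ===== VERDICT (by name: the statement is the Claim_ definition above) =====
theorem posIntSol_spec : Claim_equal_posIntSol := by
  unfold Claim_equal_posIntSol
  intro s _ _
  unfold Spec_posIntSol posIntSol posIntSol_alt
  have hA : (fun (st : Int × Int) (i : Int) =>
      (st.1 + (if PySem.List.pyGet? s.toList i = some '+' then 1 else 0),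
       if PySem.List.pyGet? s.toList i = some '=' then i else st.2)) = pvStepA s.toList := rfl
  have hB : (fun (st : Int × Int) (p : Int × Char) =>
      if p.2 = '+' then (st.1 + 1, st.2)
      else if p.2 = '=' then (st.1, p.1)
      else st) = pvStepB := rfl
  simp only [hA, hB, pv_parse_rel s.toList]
  set b := (PySem.List.enumerate s.toList 0).foldl pvStepB (1, 0)
  have hb1 : 1 ≤ b.1 := pv_foldB_ge _ _ (by norm_num)
  have hn : b.1 - 1 + 1 = b.1 := by ring
  simp only [hn]
  cases hof : PySem.Int.ofChars? (PySem.List.slice s.toList (some (b.2 + 1)) none) with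
  | none => rfl
  | some k =>
      dsimp only
      by_cases hnk : b.1 > k
      · rw [if_pos hnk, if_pos hnk]
      · rw [if_neg hnk, if_neg hnk]
        have hkn : b.1 ≤ k := by omega
        set N : Nat := (k - 1).toNat with hN
        set R : Nat := (b.1 - 1).toNat with hR
        have hk1 : k - 1 = ((N : Nat) : Int) := by omega
        have hn1 : b.1 - 1 = ((R : Nat) : Int) := by omega
        have hRN : R ≤ N := by omega
        rw [hk1, hn1, pv_cal_eq_choose N R hRN]
        have hmin : min (((R : Nat) : Int)) (k - b.1) = ((min R (N - R) : Nat) : Int) := by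
          omega
        rw [hmin]
        rw [pv_bloop N (min R (N - R)) (by omega)]
        by_cases hle : R ≤ N - R
        · rw [min_eq_left hle]
        · rw [min_eq_right (by omega)]
          norm_cast
          exact (Nat.choose_symm hRN).symm
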